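-- pv_equiv track=rewrite | github.com/Bens-Jammin/csi_3120_a1 | A1.py | add_correct_spacing
-- ===== SOURCE A (Python) =====
-- def add_correct_spacing(s: str) -> str:
--     """
--     the parse_str function doesnt work for examples such as:
--     a \\x(x b)
--     because it parses "\\x(x" into one token. This function stops that from happening
--     """
--     result = ""
--
--     for idx, char in enumerate(s):
--         if (char == "\\" or char == "(" or char == ")"):
--             if (idx - 1 >= 0) and (s[idx - 1] != " "):
--                 result += " "
--
--         result += char
--
--         if (char == "\\" or char == "(" or char == ")"):
--             if (idx + 1 < len(s)) and (s[idx + 1] != " "):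
--                 result += " "
--
--     return result
-- ===== SOURCE B (Python) =====
-- def add_correct_spacing(s: str) -> str:
--     """Tokenize s into runs and special characters, then rejoin with spacing
--     decided only at the run boundaries."""
--     # Stage 1: a leading run + one (special, run-that-follows-it) pair per special.
--     first = ''
--     pairs = []
--     for ch in s:
--         if ch in ('\\', '(', ')'):
--             pairs.append((ch, ''))
--         elif pairs:
--             d, run = pairs[-1]
--             pairs[-1] = (d, run + ch)
--         else:
--             first += ch
--     # Stage 2: rebuild; each special consults only the boundaries of its runs.
--     out = [first]
--     prev = first[-1] if first else None
--     rest = pairs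
--     while rest:
--         (d, run), rest = rest[0], rest[1:]
--         nxt = run[0] if run else (rest[0][0] if rest else None)
--         before = ' ' if prev is not None and prev != ' ' else ''
--         after = ' ' if nxt is not None and nxt != ' ' else ''
--         out.append(before + d + after)
--         out.append(run)
--         prev = run[-1] if run else d
--     return ''.join(out)
-- ===== Notes on version B (the rewrite author's own statement) =====
-- stated objective: alternative
-- what changed: B replaces A's single character-by-character pass with index-based neighbour lookups by a two-stage algorithm: it first tokenizes the string into a leading run plus (special, following-run) pairs, then rejoins the tokens, deciding each special's spacing only from the boundaries of the adjacent runs.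
import Mathlib
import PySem

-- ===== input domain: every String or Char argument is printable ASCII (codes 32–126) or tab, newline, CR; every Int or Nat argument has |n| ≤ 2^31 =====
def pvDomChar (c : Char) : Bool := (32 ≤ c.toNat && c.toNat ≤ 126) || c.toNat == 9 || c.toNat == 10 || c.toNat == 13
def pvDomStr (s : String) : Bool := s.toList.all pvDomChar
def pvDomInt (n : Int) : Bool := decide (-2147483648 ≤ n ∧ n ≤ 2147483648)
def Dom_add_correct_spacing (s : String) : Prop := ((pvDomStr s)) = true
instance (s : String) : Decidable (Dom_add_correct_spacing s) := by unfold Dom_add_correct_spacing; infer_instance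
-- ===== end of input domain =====

-- B replaces A's per-character neighbour-checking pass by a two-stage tokenize-then-join
-- algorithm; same O(n) cost, a genuinely different decomposition.

-- ===== PORT A =====
-- char == "\\" or char == "(" or char == ")"
def acsSpecial (c : Char) : Bool := c == '\\' || c == '(' || c == ')'

-- Literal port of A: fold over enumerate(s), accumulating the result (strings as List Char;
-- s[idx-1]/s[idx+1] via pyGetD, exact here since both accesses are guarded in range).
def add_correct_spacing (s : String) : String :=
  let cs := s.toList
  String.mk ((PySem.List.enumerate cs).foldl (fun result ic =>
    let idx := ic.1
    let c := ic.2
    let r1 := if acsSpecial c && decide (0 ≤ idx - 1) && (PySem.List.pyGetD cs (idx - 1) ' ' != ' ')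
              then result ++ [' '] else result
    let r2 := r1 ++ [c]
    if acsSpecial c && decide (idx + 1 < (cs.length : Int)) && (PySem.List.pyGetD cs (idx + 1) ' ' != ' ')
    then r2 ++ [' '] else r2) [])

-- ===== PORT B =====
-- Stage 1 of Source B: the for-loop building (first, pairs); `pairs[-1] = (d, run + ch)` is
-- rendered as dropLast ++ [updated last] (getLast? none = Python's `elif pairs:` failing).
def acsStage1 (cs : List Char) : List Char × List (Char × List Char) :=
  cs.foldl (fun st ch =>
    if acsSpecial ch then (st.1, st.2 ++ [(ch, [])])
    else
      match st.2.getLast? with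
      | some dr => (st.1, st.2.dropLast ++ [(dr.1, dr.2 ++ [ch])])
      | none => (st.1 ++ [ch], st.2)) ([], [])

-- Stage 2 of Source B: the while-loop consuming `rest` from the front, carrying `prev`.
def acsJoin (prev : Option Char) : List (Char × List Char) → List Char
  | [] => []
  | (d, run) :: rest =>
    let nxt : Option Char :=
      match run.head? with
      | some c => some c
      | none => rest.head?.map Prod.fst
    (if prev.elim false (· != ' ') then [' '] else []) ++ [d] ++
    (if nxt.elim false (· != ' ') then [' '] else []) ++ run ++
    acsJoin (match run.getLast? with | some c => some c | none => some d) rest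

-- Literal port of B (Source B): tokenize, then join (''.join of the emitted chunks).
def add_correct_spacing_alt (s : String) : String :=
  let st := acsStage1 s.toList
  String.mk (st.1 ++ acsJoin st.1.getLast? st.2)

-- ===== PRECONDITION & SPEC =====
def Spec_add_correct_spacing (s : String) (out : String) : Prop := out = add_correct_spacing_alt s
instance (s : String) (out : String) : Decidable (Spec_add_correct_spacing s out) := by unfold Spec_add_correct_spacing; infer_instance

-- ===== CLAIM (what is proved, stated in full; the proofs are below) =====
def Claim_equal_add_correct_spacing : Prop := ∀ (s : String), Dom_add_correct_spacing s → Spec_add_correct_spacing s (add_correct_spacing s)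

-- ===== LEMMAS AND PROOFS =====

-- the segment A's loop body appends for the element (idx, c)
def acsSegA (cs : List Char) (idx : Int) (c : Char) : List Char :=
  (if acsSpecial c && decide (0 ≤ idx - 1) && (PySem.List.pyGetD cs (idx - 1) ' ' != ' ')
   then [' '] else []) ++ [c] ++
  (if acsSpecial c && decide (idx + 1 < (cs.length : Int)) && (PySem.List.pyGetD cs (idx + 1) ' ' != ' ')
   then [' '] else [])

-- the segment for one (prev, char, next) neighbourhood
def acsSeg (p : Option Char) (c : Char) (n : Option Char) : List Char :=
  if acsSpecial c then
    (if p.elim false (· != ' ') then [' '] else []) ++ [c] ++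
    (if n.elim false (· != ' ') then [' '] else [])
  else [c]

-- common reference recursion: walk the list carrying the previous character
def acsG (p : Option Char) : List Char → List Char
  | [] => []
  | c :: rest => acsSeg p c rest.head? ++ acsG (some c) rest

-- structural spec of stage 1
def acsTok : List Char → List Char × List (Char × List Char)
  | [] => ([], [])
  | c :: rest =>
    if acsSpecial c then ([], (c, (acsTok rest).1) :: (acsTok rest).2)
    else ((c :: (acsTok rest).1), (acsTok rest).2)

theorem acs_foldl_eq (cs : List Char) (l : List (Int × Char)) (acc : List Char) :
    l.foldl (fun result ic =>
      let idx := ic.1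
      let c := ic.2
      let r1 := if acsSpecial c && decide (0 ≤ idx - 1) && (PySem.List.pyGetD cs (idx - 1) ' ' != ' ')
                then result ++ [' '] else result
      let r2 := r1 ++ [c]
      if acsSpecial c && decide (idx + 1 < (cs.length : Int)) && (PySem.List.pyGetD cs (idx + 1) ' ' != ' ')
      then r2 ++ [' '] else r2) acc
    = acc ++ (l.map (fun ic => acsSegA cs ic.1 ic.2)).flatten := by
  induction l generalizing acc with
  | nil => simp
  | cons hd tl ih =>
    simp only [List.foldl_cons, List.map_cons, List.flatten_cons, ih, acsSegA]
    split_ifs <;> simp_all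

theorem acs_lists_eq (cs : List Char) :
    (((((none : Option Char) :: cs.dropLast.map some).zip cs).zip (cs.tail.map some ++ [none])).map
       (fun pcn => acsSeg pcn.1.1 pcn.1.2 pcn.2))
    = (PySem.List.enumerate cs).map (fun ic => acsSegA cs ic.1 ic.2) := by
  apply List.ext_getElem
  · simp [PySem.List.length_enumerate]
    omega
  · intro i h1 h2
    have hlen : i < cs.length := by simp [PySem.List.length_enumerate] at h2; omega
    simp only [List.getElem_map, List.getElem_zip, PySem.List.getElem_enumerate]
    have hp : ((none : Option Char) :: cs.dropLast.map some)[i]'(by simpa using (by omega : i < cs.length - 1 + 1)) =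
        if h : i = 0 then none else some (cs[i - 1]'(by omega)) := by
      cases i with
      | zero => simp
      | succ k =>
        simp only [List.getElem_cons_succ, List.getElem_map]
        rw [List.getElem_dropLast]
        simp
    have hn : (cs.tail.map some ++ [none])[i]'(by simp; omega) =
        if h : i + 1 < cs.length then some (cs[i + 1]'h) else none := by
      by_cases h : i + 1 < cs.length
      · rw [List.getElem_append_left (by simp; omega)]
        simp [List.getElem_tail, h]
      · rw [List.getElem_append_right (by simp; omega)]
        simp [h]
    rw [hp, hn]
    simp only [acsSeg, acsSegA]
    by_cases hs : acsSpecial cs[i]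
    · simp only [hs, if_pos, Bool.true_and]
      congr 1
      · congr 1
        by_cases h0 : i = 0
        · subst h0; simp
        · have h1i : 1 ≤ i := by omega
          have : ((0 : Int) + i) - 1 = ((i - 1 : Nat) : Int) := by omega
          rw [dif_neg h0, this, PySem.List.pyGetD_natCast]
          simp [List.getD_eq_getElem?_getD, List.getElem?_eq_getElem (by omega : i - 1 < cs.length)]
      · by_cases hi1 : i + 1 < cs.length
        · have hcc : ((i : Int) + 1) < (cs.length : Int) := by omega
          have hcast : ((0 : Int) + i) + 1 = ((i + 1 : Nat) : Int) := by push_cast; ring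
          rw [dif_pos hi1, hcast, PySem.List.pyGetD_natCast]
          simp [hcc, List.getD_eq_getElem?_getD, List.getElem?_eq_getElem hi1]
        · rw [dif_neg hi1]
          simp
          omega
    · simp [hs]

-- the zip3 map/flatten form is the reference recursion
theorem acs_triples_eq_g (l : List Char) (p : Option Char) :
    ((((p :: l.dropLast.map some).zip l).zip (l.tail.map some ++ [none])).map
       (fun pcn => acsSeg pcn.1.1 pcn.1.2 pcn.2)).flatten = acsG p l := by
  induction l generalizing p with
  | nil => simp [acsG]
  | cons c rest ih =>
    cases rest with
    | nil => simp [acsG]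
    | cons r rest' =>
      rw [show acsG p (c :: r :: rest') = acsSeg p c (some r) ++ acsG (some c) (r :: rest') from rfl,
        ← ih (some c)]
      simp only [List.dropLast_cons_of_ne_nil (List.cons_ne_nil r rest'), List.map_cons,
        List.tail_cons, List.zip_cons_cons]
      rw [List.cons_append, List.zip_cons_cons, List.map_cons, List.flatten_cons]

-- A equals the reference recursion
theorem acs_A_eq_g (s : String) :
    add_correct_spacing s = String.mk (acsG none s.toList) := by
  simp only [add_correct_spacing]
  rw [acs_foldl_eq, ← acs_lists_eq, acs_triples_eq_g]
  simp

-- stage-1 fold, state with a nonempty pairs list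
theorem acs_stage1_snoc (cs : List Char) (F : List Char) (P : List (Char × List Char))
    (d : Char) (r : List Char) :
    cs.foldl (fun st ch =>
      if acsSpecial ch then (st.1, st.2 ++ [(ch, [])])
      else
        match st.2.getLast? with
        | some dr => (st.1, st.2.dropLast ++ [(dr.1, dr.2 ++ [ch])])
        | none => (st.1 ++ [ch], st.2)) (F, P ++ [(d, r)])
    = (F, P ++ [(d, r ++ (acsTok cs).1)] ++ (acsTok cs).2) := by
  induction cs generalizing P d r with
  | nil => simp [acsTok]
  | cons ch rest ih =>
    rw [List.foldl_cons]
    by_cases hs : acsSpecial ch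
    · rw [if_pos hs, show acsTok (ch :: rest) = ([], (ch, (acsTok rest).1) :: (acsTok rest).2)
        from by simp [acsTok, hs]]
      have := ih (P ++ [(d, r)]) ch []
      simp only [List.append_assoc] at this
      simpa using this
    · rw [if_neg hs, show acsTok (ch :: rest) = (ch :: (acsTok rest).1, (acsTok rest).2)
        from by simp [acsTok, hs]]
      have hlast : (P ++ [(d, r)]).getLast? = some (d, r) := by simp
      rw [hlast]
      simp only [List.dropLast_concat]
      rw [ih P d (r ++ [ch])]
      simp

-- stage-1 fold, empty pairs state: it computes acsTok
theorem acs_stage1_eq_tok (cs : List Char) (F : List Char) :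
    cs.foldl (fun st ch =>
      if acsSpecial ch then (st.1, st.2 ++ [(ch, [])])
      else
        match st.2.getLast? with
        | some dr => (st.1, st.2.dropLast ++ [(dr.1, dr.2 ++ [ch])])
        | none => (st.1 ++ [ch], st.2)) (F, [])
    = (F ++ (acsTok cs).1, (acsTok cs).2) := by
  induction cs generalizing F with
  | nil => simp [acsTok]
  | cons ch rest ih =>
    rw [List.foldl_cons]
    by_cases hs : acsSpecial ch
    · rw [if_pos hs, show acsTok (ch :: rest) = ([], (ch, (acsTok rest).1) :: (acsTok rest).2)
        from by simp [acsTok, hs]]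
      have := acs_stage1_snoc rest F [] ch []
      simp only [List.nil_append] at this
      simpa using this
    · rw [if_neg hs, show acsTok (ch :: rest) = (ch :: (acsTok rest).1, (acsTok rest).2)
        from by simp [acsTok, hs], List.getLast?_nil]
      rw [ih (F ++ [ch])]
      simp

-- the head character of a list, recovered from its tokenization
theorem acs_tok_head (l : List Char) :
    (match (acsTok l).1.head? with
     | some c => some c
     | none => (acsTok l).2.head?.map Prod.fst) = l.head? := by
  cases l with
  | nil => simp [acsTok]
  | cons c rest =>
    by_cases hs : acsSpecial c <;> simp [acsTok, hs]

-- carry the previous character past a run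
def acsLastOr (l : List Char) (p : Option Char) : Option Char :=
  match l.getLast? with
  | some c => some c
  | none => p

theorem acs_lastOr_cons (c : Char) (l : List Char) (p : Option Char) :
    acsLastOr (c :: l) p = acsLastOr l (some c) := by
  cases l with
  | nil => simp [acsLastOr]
  | cons x xs =>
    rcases h : (x :: xs).getLast? with _ | y
    · simp at h
    · simp [acsLastOr, List.getLast?_cons_cons, h]

-- joining the tokenization is the reference recursion
theorem acs_join_tok (l : List Char) (p : Option Char) :
    (acsTok l).1 ++ acsJoin (acsLastOr (acsTok l).1 p) (acsTok l).2 = acsG p l := by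
  induction l generalizing p with
  | nil => simp [acsTok, acsJoin, acsG]
  | cons c rest ih =>
    by_cases hs : acsSpecial c
    · simp only [acsTok, hs, if_pos, List.nil_append, acsG]
      show acsJoin (acsLastOr [] p) ((c, (acsTok rest).1) :: (acsTok rest).2) = _
      simp only [acsLastOr, List.getLast?_nil, acsJoin]
      rw [acs_tok_head rest]
      have hlast : (match (acsTok rest).1.getLast? with
          | some x => some x
          | none => some c) = acsLastOr (acsTok rest).1 (some c) := by
        simp [acsLastOr]
      rw [hlast]
      simp only [List.append_assoc]
      rw [ih (some c)]
      simp [acsSeg, hs]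
    · rw [show acsTok (c :: rest) = (c :: (acsTok rest).1, (acsTok rest).2)
        from by simp [acsTok, hs]]
      show (c :: (acsTok rest).1) ++ acsJoin (acsLastOr (c :: (acsTok rest).1) p) (acsTok rest).2 = _
      rw [acs_lastOr_cons, List.cons_append, ih (some c)]
      simp [acsG, acsSeg, hs]

-- B equals the reference recursion
theorem acs_B_eq_g (s : String) :
    add_correct_spacing_alt s = String.mk (acsG none s.toList) := by
  simp only [add_correct_spacing_alt, acsStage1]
  rw [acs_stage1_eq_tok s.toList []]
  have : (acsTok s.toList).1.getLast? = (acsLastOr (acsTok s.toList).1 none) := by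
    cases h : (acsTok s.toList).1.getLast? <;> simp [acsLastOr, h]
  simp only [List.nil_append, this]
  rw [acs_join_tok s.toList none]

-- ===== VERDICT (by name: the statement is the Claim_ definition above) =====
theorem add_correct_spacing_spec : Claim_equal_add_correct_spacing := by
  intro s _
  unfold Spec_add_correct_spacing
  rw [acs_A_eq_g, acs_B_eq_g]
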